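-- pv_equiv track=rewrite | github.com/ramon15749/ProjectAllocation | app/allocation.py | getUnfairDict
-- ===== SOURCE A (Python) =====
-- from collections import deque, defaultdict, namedtuple
-- from typing import (
--     Dict,
--     NewType,
--     Tuple,
--     List,
--     Deque,
--     Set,
--     NamedTuple,
--     Optional,
--     Callable,
--     Generator,
-- )
--
-- StudentID = NewType("StudentID", int)
--
-- ProjectID = NewType("ProjectID", int)
--
-- Move = Tuple[StudentID, ProjectID]
--
-- def getProjectPreferences(costMap: Dict[Move, int]) -> Dict[ProjectID, List[int]]:
--     projectStudentPref: Dict[ProjectID, List[int]] = defaultdict(list)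
--     for (_, proj), cost in costMap.items():
--         projectStudentPref[proj] += [cost]
--     return projectStudentPref
--
-- def getUnfairDict(
--     SPalloc: Dict[StudentID, ProjectID], costMap: Dict[Move, int]
-- ) -> Dict[ProjectID, List[int]]:
--     projectStudentPref = getProjectPreferences(costMap)
--     costs = {}
--     for s, p in SPalloc.items():
--         current = costMap[(s, p)]
--         filtered = list(
--             filter(lambda x: True if x < current else False, projectStudentPref[p])
--         )
--         costs[p] = [current - x for x in filtered]
--
--     return costs
-- ===== SOURCE B (Python) =====
-- def getUnfairDict(SPalloc, costMap):
--     costs = {}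
--     for s, p in SPalloc.items():
--         current = costMap[(s, p)]
--         costs[p] = [current - c for (_, p2), c in costMap.items() if p2 == p and c < current]
--     return costs
-- ===== Notes on version B (the rewrite author's own statement) =====
-- stated objective: simpler
-- what changed: Drops the getProjectPreferences per-project index table; B computes each allocated project's list by one direct filtered scan of costMap.items(), in a single loop with no helper or intermediate dict.
import Mathlib
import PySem

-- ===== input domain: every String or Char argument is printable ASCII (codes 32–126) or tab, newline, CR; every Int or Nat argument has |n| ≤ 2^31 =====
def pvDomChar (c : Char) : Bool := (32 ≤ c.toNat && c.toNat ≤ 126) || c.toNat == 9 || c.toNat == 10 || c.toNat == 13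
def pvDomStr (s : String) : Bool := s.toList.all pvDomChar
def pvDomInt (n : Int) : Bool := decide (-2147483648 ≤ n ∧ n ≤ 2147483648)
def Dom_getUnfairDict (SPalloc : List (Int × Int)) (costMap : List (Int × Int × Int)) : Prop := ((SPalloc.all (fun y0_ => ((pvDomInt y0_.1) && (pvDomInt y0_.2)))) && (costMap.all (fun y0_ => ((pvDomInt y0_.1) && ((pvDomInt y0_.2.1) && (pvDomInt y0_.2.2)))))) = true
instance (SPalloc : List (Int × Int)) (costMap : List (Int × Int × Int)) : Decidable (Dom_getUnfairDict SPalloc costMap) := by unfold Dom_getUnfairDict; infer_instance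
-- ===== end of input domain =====

-- B drops A's getProjectPreferences index table and filters costMap directly per allocated
-- student: simpler (one loop, no helper), same return value.

-- ===== PORT A =====
-- costMap[(s, p)] : first-match lookup in the association list (KeyError = no match, excluded by Pre_;
-- the 0 default is never reached inside Pre_).
def pyCostLookup (costMap : List (Int × Int × Int)) (s p : Int) : Int :=
  ((costMap.find? (fun t => t.1 == s && t.2.1 == p)).map (·.2.2)).getD 0

-- getProjectPreferences: defaultdict(list) grouping of costs by project
def getProjectPreferences (costMap : List (Int × Int × Int)) : PySem.Dict Int (List Int) :=
  costMap.foldl (fun d t => d.modify t.2.1 [] (· ++ [t.2.2])) PySem.Dict.empty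

def getUnfairDict (SPalloc : List (Int × Int)) (costMap : List (Int × Int × Int)) : List (Int × List Int) :=
  let projectStudentPref := getProjectPreferences costMap
  let costs := SPalloc.foldl (fun costs sp =>
      let current := pyCostLookup costMap sp.1 sp.2
      let filtered := (projectStudentPref.getD sp.2 []).filter (fun x => x < current)
      costs.insert sp.2 (filtered.map (fun x => current - x))) PySem.Dict.empty
  costs.items

-- ===== PORT B =====
def getUnfairDict_alt (SPalloc : List (Int × Int)) (costMap : List (Int × Int × Int)) : List (Int × List Int) :=
  (SPalloc.foldl (fun costs sp =>
      let current := pyCostLookup costMap sp.1 sp.2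
      costs.insert sp.2 ((costMap.filter (fun t => t.2.1 == sp.2 && t.2.2 < current)).map
        (fun t => current - t.2.2))) PySem.Dict.empty).items

-- ===== PRECONDITION & SPEC =====
-- Pre_ excludes exactly the inputs where costMap[(s, p)] raises KeyError (both A and B raise there).
def Pre_getUnfairDict (SPalloc : List (Int × Int)) (costMap : List (Int × Int × Int)) : Prop :=
  (SPalloc.all (fun sp => costMap.any (fun t => t.1 == sp.1 && t.2.1 == sp.2))) = true
instance (SPalloc : List (Int × Int)) (costMap : List (Int × Int × Int)) : Decidable (Pre_getUnfairDict SPalloc costMap) := by unfold Pre_getUnfairDict; infer_instance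

def pvWitness_getUnfairDict : (List (Int × Int)) × (List (Int × Int × Int)) :=
  ([(1, 10), (2, 10)], [(1, 10, 5), (2, 10, 3), (4, 10, 1)])

def Spec_getUnfairDict (SPalloc : List (Int × Int)) (costMap : List (Int × Int × Int)) (out : List (Int × List Int)) : Prop := out = getUnfairDict_alt SPalloc costMap
instance (SPalloc : List (Int × Int)) (costMap : List (Int × Int × Int)) (out : List (Int × List Int)) : Decidable (Spec_getUnfairDict SPalloc costMap out) := by unfold Spec_getUnfairDict; infer_instance

-- ===== CLAIM (what is proved, stated in full; the proofs are below) =====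
def Claim_equal_getUnfairDict : Prop := ∀ (SPalloc : List (Int × Int)) (costMap : List (Int × Int × Int)), Dom_getUnfairDict SPalloc costMap → Pre_getUnfairDict SPalloc costMap → Spec_getUnfairDict SPalloc costMap (getUnfairDict SPalloc costMap)

-- ===== LEMMAS AND PROOFS =====

-- A's per-project index entry IS the direct filtered scan of costMap.
lemma pref_getD (costMap : List (Int × Int × Int)) (p : Int) :
    (getProjectPreferences costMap).getD p []
      = (costMap.filter (fun t => t.2.1 == p)).map (·.2.2) := by
  unfold getProjectPreferences
  have h : costMap.foldl (fun (d : PySem.Dict Int (List Int)) t => d.modify t.2.1 [] (· ++ [t.2.2]))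
        PySem.Dict.empty
      = (costMap.map (fun t => (t.2.1, t.2.2))).foldl
          (fun (d : PySem.Dict Int (List Int)) q => d.modify q.1 [] (· ++ [q.2]))
          PySem.Dict.empty :=
    (List.foldl_map (f := fun (t : Int × Int × Int) => (t.2.1, t.2.2))
      (g := fun (d : PySem.Dict Int (List Int)) q => d.modify q.1 [] (· ++ [q.2]))).symm
  rw [h, PySem.Dict.getD_foldl_modify_append]
  simp [List.filter_map, Function.comp_def]

lemma body_eq (costMap : List (Int × Int × Int)) (costs : PySem.Dict Int (List Int))
    (sp : Int × Int) :
    (let current := pyCostLookup costMap sp.1 sp.2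
     let filtered := ((getProjectPreferences costMap).getD sp.2 []).filter (fun x => x < current)
     costs.insert sp.2 (filtered.map (fun x => current - x)))
    = (let current := pyCostLookup costMap sp.1 sp.2
       costs.insert sp.2 ((costMap.filter (fun t => t.2.1 == sp.2 && t.2.2 < current)).map
         (fun t => current - t.2.2))) := by
  simp only [pref_getD, List.filter_map, List.map_map, List.filter_filter, Function.comp_def]
  congr 2
  apply List.filter_congr
  intro t _
  rw [Bool.and_comm]

-- ===== VERDICT (by name: the statement is the Claim_ definition above) =====
theorem getUnfairDict_spec : Claim_equal_getUnfairDict := by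
  intro SPalloc costMap _ _
  show (SPalloc.foldl (fun costs sp =>
      let current := pyCostLookup costMap sp.1 sp.2
      let filtered := ((getProjectPreferences costMap).getD sp.2 []).filter (fun x => x < current)
      costs.insert sp.2 (filtered.map (fun x => current - x))) PySem.Dict.empty).items
    = getUnfairDict_alt SPalloc costMap
  unfold getUnfairDict_alt
  congr 1
  apply List.foldl_ext
  intro costs sp _
  exact body_eq costMap costs sp
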